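-- pv_equiv track=rewrite | github.com/patrickmay/advent-of-code-2018 | day6.py | reduce_map
-- ===== SOURCE A (Python) =====
-- from collections import defaultdict
--
-- def reduce_map(map):
--     """
--     Reduce the MAP so that each array cell contains only the closest
--     points.  (This could be combined with distance_map() for better
--     efficiency).
--     """
--     reduced_map = defaultdict(lambda: defaultdict(lambda: list()))
--     for i in map:
--         for j in map[i]:
--             closest = min([point[1] for point in map[i][j]])
--             reduced_map[i][j] = [point for point in map[i][j]
--                                  if point[1] == closest]
--
--     return reduced_map
-- ===== SOURCE B (Python) =====
-- from collections import defaultdict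
--
-- def reduce_map(map):
--     """
--     Same reduction, but each cell's survivors are found in a single pass
--     over its point list (running best distance + kept list) instead of a
--     min() pass followed by a filtering comprehension, and rows/cells are
--     taken from .items() instead of repeated map[i] / map[i][j] lookups.
--     """
--     reduced_map = defaultdict(lambda: defaultdict(lambda: list()))
--     for i, row in map.items():
--         for j, points in row.items():
--             best = None
--             keep = []
--             for point in points:
--                 d = point[1]
--                 if best is None or d < best:
--                     best, keep = d, [point]
--                 elif d == best:
--                     keep.append(point)
--             reduced_map[i][j] = keep
--     return reduced_map
-- ===== Notes on version B (the rewrite author's own statement) =====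
-- stated objective: alternative
-- what changed: Each cell's closest points are selected in one pass with a running best distance and kept list (rows/cells taken from .items()), instead of building a distance list, taking min() of it, and then filtering the cell with a comprehension plus repeated map[i]/map[i][j] lookups.
import Mathlib
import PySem

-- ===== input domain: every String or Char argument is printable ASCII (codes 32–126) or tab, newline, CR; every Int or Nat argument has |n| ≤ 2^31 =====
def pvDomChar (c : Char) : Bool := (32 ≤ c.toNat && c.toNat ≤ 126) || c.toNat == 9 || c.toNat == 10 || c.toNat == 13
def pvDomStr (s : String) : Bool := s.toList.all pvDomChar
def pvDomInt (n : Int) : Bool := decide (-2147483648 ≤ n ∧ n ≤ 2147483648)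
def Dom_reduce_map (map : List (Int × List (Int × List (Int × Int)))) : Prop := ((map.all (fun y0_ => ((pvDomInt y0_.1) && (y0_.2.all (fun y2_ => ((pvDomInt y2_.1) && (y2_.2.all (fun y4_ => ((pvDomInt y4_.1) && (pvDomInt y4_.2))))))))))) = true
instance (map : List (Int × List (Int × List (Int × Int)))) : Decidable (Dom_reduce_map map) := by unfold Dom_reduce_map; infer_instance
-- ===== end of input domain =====

-- B changes the per-cell selection to a single running-best pass over .items(); equivalence of return values on maps with unique keys and no empty cell.

-- ===== PORT A =====
-- for i in map: for j in map[i]: closest = min(...); reduced_map[i][j] = [filter]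
-- dicts are association lists; map[i] / map[i][j] are first-match lookups (PySem.Dict.get?);
-- min([]) raises ValueError: the `none` branch is unreachable under Pre_.
def reduce_map (map : List (Int × List (Int × List (Int × Int)))) : List (Int × List (Int × List (Int × Int))) :=
  ((map.foldl (fun (red : PySem.Dict Int (PySem.Dict Int (List (Int × Int)))) ik =>
      let row := ((PySem.Dict.mk map).get? ik.1).getD []
      row.foldl (fun red jk =>
        let pts := ((PySem.Dict.mk row).get? jk.1).getD []
        match PySem.List.min? (pts.map (fun point => point.2)) (fun x => x) with
        | none => red
        | some closest =>
          red.insert ik.1 ((red.getD ik.1 PySem.Dict.empty).insert jk.1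
            (pts.filter (fun point => point.2 == closest)))) red)
    PySem.Dict.empty).items).map (fun p => (p.1, p.2.items))

-- ===== PORT B =====
-- the body of B's inner `for point in points` loop (running best distance + kept list)
def bestStep (s : Option Int × List (Int × Int)) (point : Int × Int) : Option Int × List (Int × Int) :=
  match s with
  | (none, _) => (some point.2, [point])
  | (some b, keep) =>
    if point.2 < b then (some point.2, [point])
    else if point.2 == b then (some b, keep ++ [point])
    else (some b, keep)

def reduce_map_alt (map : List (Int × List (Int × List (Int × Int)))) : List (Int × List (Int × List (Int × Int))) :=
  ((map.foldl (fun (red : PySem.Dict Int (PySem.Dict Int (List (Int × Int)))) irow =>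
      irow.2.foldl (fun red jpts =>
        let bk := jpts.2.foldl bestStep ((none : Option Int), ([] : List (Int × Int)))
        red.insert irow.1 ((red.getD irow.1 PySem.Dict.empty).insert jpts.1 bk.2)) red)
    PySem.Dict.empty).items).map (fun p => (p.1, p.2.items))

-- ===== PRECONDITION & SPEC =====
-- Pre_ excludes (a) maps with an empty cell point list, on which Python A raises ValueError (min of
-- empty sequence), and (b) association lists with duplicate outer or inner keys, which no Python dict
-- input can produce (dict keys are unique) and on which first-match lookup vs. entry iteration is
-- a representation artefact.
def Pre_reduce_map (map : List (Int × List (Int × List (Int × Int)))) : Prop :=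
  (map.map Prod.fst).Nodup ∧
  ∀ p ∈ map, (p.2.map Prod.fst).Nodup ∧ ∀ q ∈ p.2, q.2 ≠ []
instance (map : List (Int × List (Int × List (Int × Int)))) : Decidable (Pre_reduce_map map) := by unfold Pre_reduce_map; infer_instance
def pvWitness_reduce_map : (List (Int × List (Int × List (Int × Int)))) :=
  [(0, [(1, [(2, 3), (4, 3), (5, 6)]), (2, [(9, 9)])]), (7, [])]

def Spec_reduce_map (map : List (Int × List (Int × List (Int × Int)))) (out : List (Int × List (Int × List (Int × Int)))) : Prop := out = reduce_map_alt map
instance (map : List (Int × List (Int × List (Int × Int)))) (out : List (Int × List (Int × List (Int × Int)))) : Decidable (Spec_reduce_map map out) := by unfold Spec_reduce_map; infer_instance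

-- ===== CLAIM (what is proved, stated in full; the proofs are below) =====
def Claim_equal_reduce_map : Prop := ∀ (map : List (Int × List (Int × List (Int × Int)))), Dom_reduce_map map → Pre_reduce_map map → Spec_reduce_map map (reduce_map map)

-- ===== LEMMAS AND PROOFS =====

-- running minimum never exceeds its start
lemma foldl_min_le_init (l : List Int) (b : Int) : l.foldl min b ≤ b := by
  induction l generalizing b with
  | nil => simp
  | cons x t ih => exact le_trans (ih (min b x)) (min_le_left _ _)

-- characterisation of B's running-best loop once a best exists
lemma bestStep_foldl_some (rest : List (Int × Int)) (b : Int) (acc : List (Int × Int)) :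
    rest.foldl bestStep (some b, acc) =
      (some ((rest.map (·.2)).foldl min b),
       (if (rest.map (·.2)).foldl min b = b then acc else []) ++
         rest.filter (fun q => q.2 == (rest.map (·.2)).foldl min b)) := by
  induction rest generalizing b acc with
  | nil => simp
  | cons q t ih =>
    simp only [List.map_cons, List.foldl_cons, List.filter_cons]
    by_cases h1 : q.2 < b
    · have hmin : min b q.2 = q.2 := min_eq_right (le_of_lt h1)
      have hstep : bestStep (some b, acc) q = (some q.2, [q]) := by simp [bestStep, h1]
      rw [hstep, ih]; simp only [hmin]
      have hle := foldl_min_le_init (t.map (fun x => x.2)) q.2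
      have hne : (t.map (fun x => x.2)).foldl min q.2 ≠ b := by omega
      rw [if_neg hne]
      by_cases h2 : (t.map (fun x => x.2)).foldl min q.2 = q.2
      · simp [h2]
      · have h2' : q.2 ≠ (t.map (fun x => x.2)).foldl min q.2 := fun h => h2 h.symm
        simp [h2, h2']
    · by_cases h2 : q.2 = b
      · have hmin : min b q.2 = b := by omega
        have hstep : bestStep (some b, acc) q = (some b, acc ++ [q]) := by
          simp [bestStep, h2]
        rw [hstep, ih]; simp only [hmin]
        by_cases h3 : (t.map (fun x => x.2)).foldl min b = b
        · simp [h3, h2, List.append_assoc]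
        · have h3' : q.2 ≠ (t.map (fun x => x.2)).foldl min b := by rw [h2]; exact fun h => h3 h.symm
          simp [h3, h3']
      · have hgt : b < q.2 := by omega
        have hmin : min b q.2 = b := by omega
        have hstep : bestStep (some b, acc) q = (some b, acc) := by
          simp [bestStep, h1, h2]
        rw [hstep, ih]; simp only [hmin]
        have hle := foldl_min_le_init (t.map (fun x => x.2)) b
        have hq : q.2 ≠ (t.map (fun x => x.2)).foldl min b := by omega
        simp [hq]

-- B's one-pass loop selects exactly A's min-then-filter survivors (nonempty cell)
lemma cell_eq (pts : List (Int × Int)) (m : Int)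
    (hm : PySem.List.min? (pts.map (fun point => point.2)) (fun x => x) = some m) :
    pts.filter (fun point => point.2 == m) = (pts.foldl bestStep (none, [])).2 := by
  cases pts with
  | nil => simp [PySem.List.min?] at hm
  | cons p rest =>
    rw [List.map_cons, PySem.List.min?_id_cons] at hm
    have hmm : (rest.map (fun point => point.2)).foldl min p.2 = m := Option.some_inj.mp hm
    have hstep : bestStep (none, []) p = (some p.2, [p]) := rfl
    rw [List.foldl_cons, hstep, bestStep_foldl_some]
    simp only [List.filter_cons]
    rw [show (rest.map (·.2)) = rest.map (fun point => point.2) from rfl, hmm]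
    by_cases h : m = p.2
    · simp [h]
    · have h' : p.2 ≠ m := fun hh => h hh.symm
      simp [h, h']

-- ===== VERDICT (by name: the statement is the Claim_ definition above) =====
theorem reduce_map_spec : Claim_equal_reduce_map := by
  intro map _ hpre
  obtain ⟨hnodup, hrows⟩ := hpre
  unfold Spec_reduce_map reduce_map reduce_map_alt
  congr 1
  congr 1
  apply PySem.List.foldl_congr_mem'
  intro ik hik red
  have hrow : ((PySem.Dict.mk map).get? ik.1).getD [] = ik.2 := by
    rw [PySem.Dict.get?_of_mem_items (d := PySem.Dict.mk map) (k := ik.1) (v := ik.2)]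
    · rfl
    · simpa using hik
    · simpa using hnodup
  simp only [hrow]
  apply PySem.List.foldl_congr_mem'
  intro jk hjk red'
  have hpts : ((PySem.Dict.mk ik.2).get? jk.1).getD [] = jk.2 := by
    rw [PySem.Dict.get?_of_mem_items (d := PySem.Dict.mk ik.2) (k := jk.1) (v := jk.2)]
    · rfl
    · simpa using hjk
    · simpa using (hrows ik hik).1
  simp only [hpts]
  have hne : jk.2 ≠ [] := (hrows ik hik).2 jk hjk
  obtain ⟨m, hm⟩ : ∃ m, PySem.List.min? (jk.2.map (fun point => point.2)) (fun x => x) = some m := by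
    cases h : PySem.List.min? (jk.2.map (fun point => point.2)) (fun x => x) with
    | none =>
      exfalso
      exact hne (by simpa using (PySem.List.min?_eq_none_iff (jk.2.map (fun point => point.2)) (fun x => x)).mp h)
    | some m => exact ⟨m, rfl⟩
  rw [hm]
  simp only [cell_eq jk.2 m hm]
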